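-- pv_equiv track=rewrite | github.com/mr8bit/ouroboros-desktop | tests/test_build_scripts.py | _iter_step_if_blocks
-- ===== SOURCE A (Python) =====
-- def _iter_step_if_blocks(src: str):
--     """Yield every `if:` expression in the workflow as a flat string.
--
--     Catches BOTH step-level and job-level `if:` blocks (the
--     `Unrecognized named-value: 'secrets'` rejection applies at every
--     level, so checking job-level too is strictly more conservative).
--
--     Heuristic: collect lines starting from `if:` until the next YAML
--     key starts (a line whose first non-space char is `-` or whose
--     stripped form contains a `:`). Known limitation: a future `if:`
--     whose continuation lines legitimately contain `:` (string literals,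
--     nested expressions) would be split prematurely; the current ci.yml
--     has no such case. If that pattern is added, switch to a real YAML
--     parser walking each step's `if` field.
--     """
--     lines = src.splitlines()
--     in_if = False
--     block: list[str] = []
--     for line in lines:
--         stripped = line.strip()
--         if stripped.startswith("if:"):
--             if in_if and block:
--                 yield " ".join(block)
--             in_if = True
--             block = [stripped]
--             continue
--         if in_if:
--             # Continuation: indented, not a new YAML key, not a step start.
--             if stripped and not stripped.startswith("- ") and ":" not in stripped:
--                 block.append(stripped)
--             else:
--                 yield " ".join(block)
--                 in_if = False
--                 block = []
--     if in_if and block: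
--         yield " ".join(block)
-- ===== SOURCE B (Python) =====
-- def _iter_step_if_blocks(src: str):
--     """Index-then-scan decomposition: find all `if:` line indices first,
--     then build each block by a forward scan from its start index."""
--     lines = src.splitlines()
--     starts = [i for i, line in enumerate(lines) if line.strip().startswith("if:")]
--     for i in starts:
--         block = [lines[i].strip()]
--         for line in lines[i + 1:]:
--             s = line.strip()
--             if not s or s.startswith("- ") or ":" in s:
--                 break
--             block.append(s)
--         yield " ".join(block)
-- ===== Notes on version B (the rewrite author's own statement) =====
-- stated objective: alternative
-- what changed: Replaces A's single-pass in_if/block state machine with a two-phase decomposition: first collect the indices of all `if:` lines, then build each block independently by scanning forward from its index until the first non-continuation line.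
import Mathlib
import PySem

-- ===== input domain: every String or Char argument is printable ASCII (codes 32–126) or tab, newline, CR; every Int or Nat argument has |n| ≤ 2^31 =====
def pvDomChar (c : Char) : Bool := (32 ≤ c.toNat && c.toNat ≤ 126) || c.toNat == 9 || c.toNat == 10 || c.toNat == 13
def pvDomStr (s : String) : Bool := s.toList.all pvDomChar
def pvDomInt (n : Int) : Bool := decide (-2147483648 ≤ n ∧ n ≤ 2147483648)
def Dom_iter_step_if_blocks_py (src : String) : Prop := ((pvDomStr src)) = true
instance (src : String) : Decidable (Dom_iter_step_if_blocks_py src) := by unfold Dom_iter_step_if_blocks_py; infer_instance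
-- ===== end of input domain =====

-- B replaces A's single-pass in_if/block state machine by an index-then-scan decomposition
-- (collect all `if:` line indices, then build each block independently); alternative, not faster.

-- ===== PORT A =====
-- the loop body of A's `for line in lines` over state (in_if, block, out)
def pvStepA (st : Bool × List String × List String) (line : String) : Bool × List String × List String :=
  let stripped := PySem.Str.strip line
  if PySem.Str.startswith stripped "if:" then
    let out := if st.1 && !st.2.1.isEmpty then st.2.2 ++ [PySem.Str.join " " st.2.1] else st.2.2
    (true, [stripped], out)
  else if st.1 then
    if stripped != "" && !PySem.Str.startswith stripped "- " && !PySem.Str.isIn ":" stripped then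
      (true, st.2.1 ++ [stripped], st.2.2)
    else
      (false, [], st.2.2 ++ [PySem.Str.join " " st.2.1])
  else st

def iter_step_if_blocks_py (src : String) : List String :=
  let lines := PySem.Str.splitlines src
  let st := lines.foldl pvStepA (false, [], [])
  if st.1 && !st.2.1.isEmpty then st.2.2 ++ [PySem.Str.join " " st.2.1] else st.2.2

-- ===== PORT B =====
-- the inner `for line in lines[i+1:] … break` loop of B
def pvCollect : List String → List String
  | [] => []
  | l :: xs =>
    let s := PySem.Str.strip l
    if s == "" || PySem.Str.startswith s "- " || PySem.Str.isIn ":" s then []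
    else s :: pvCollect xs

def iter_step_if_blocks_py_alt (src : String) : List String :=
  let lines := PySem.Str.splitlines src
  let starts := ((PySem.List.enumerate lines 0).filter
      (fun p => PySem.Str.startswith (PySem.Str.strip p.2) "if:")).map Prod.fst
  starts.map (fun i =>
    let block := PySem.Str.strip (PySem.List.pyGetD lines i "") ::
      pvCollect (PySem.List.slice lines (some (i + 1)) none)
    PySem.Str.join " " block)

-- ===== PRECONDITION & SPEC =====
def Spec_iter_step_if_blocks_py (src : String) (out : List String) : Prop := out = iter_step_if_blocks_py_alt src
instance (src : String) (out : List String) : Decidable (Spec_iter_step_if_blocks_py src out) := by unfold Spec_iter_step_if_blocks_py; infer_instance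

-- ===== CLAIM (what is proved, stated in full; the proofs are below) =====
def Claim_equal_iter_step_if_blocks_py : Prop := ∀ (src : String), Dom_iter_step_if_blocks_py src → Spec_iter_step_if_blocks_py src (iter_step_if_blocks_py src)

-- ===== LEMMAS AND PROOFS =====

-- continuation test on a stripped line
def pvCont (s : String) : Bool :=
  s != "" && !PySem.Str.startswith s "- " && !PySem.Str.isIn ":" s

-- reference recursion: what A computes from state in_if=false (pvRunF) resp. in_if=true with block b (pvRunT)
mutual
def pvRunF : List String → List String
  | [] => []
  | l :: rest =>
    let s := PySem.Str.strip l
    if PySem.Str.startswith s "if:" then pvRunT [s] rest else pvRunF rest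
def pvRunT (b : List String) : List String → List String
  | [] => [PySem.Str.join " " b]
  | l :: rest =>
    let s := PySem.Str.strip l
    if PySem.Str.startswith s "if:" then PySem.Str.join " " b :: pvRunT [s] rest
    else if pvCont s then pvRunT (b ++ [s]) rest
    else PySem.Str.join " " b :: pvRunF rest
end

def pvFinish (st : Bool × List String × List String) : List String :=
  if st.1 && !st.2.1.isEmpty then st.2.2 ++ [PySem.Str.join " " st.2.1] else st.2.2

lemma pvContDef (s : String) :
    (s != "" && !PySem.Str.startswith s "- " && !PySem.Str.isIn ":" s) = pvCont s := rfl

lemma pvFold_run : ∀ (lines : List String),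
    (∀ out, pvFinish (List.foldl pvStepA (false, [], out) lines) = out ++ pvRunF lines) ∧
    (∀ b out, b ≠ [] → pvFinish (List.foldl pvStepA (true, b, out) lines) = out ++ pvRunT b lines) := by
  intro lines
  induction lines with
  | nil =>
    constructor
    · intro out; simp only [List.foldl_nil, pvFinish, Bool.false_and, Bool.false_eq_true,
        if_false, pvRunF, List.append_nil]
    · intro b out hb
      simp only [List.foldl_nil, pvFinish, pvRunT, Bool.true_and, Bool.not_eq_eq_eq_not,
        Bool.not_true, List.isEmpty_eq_false_iff]
      rw [if_pos (by simpa [List.isEmpty_iff] using hb)]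
  | cons l rest ih =>
    have step : ∀ st, List.foldl pvStepA st (l :: rest) = List.foldl pvStepA (pvStepA st l) rest :=
      fun _ => List.foldl_cons ..
    constructor
    · intro out
      rw [step]
      by_cases h : PySem.Str.startswith (PySem.Str.strip l) "if:" = true
      · simp only [pvStepA, h, if_true, Bool.false_and, Bool.false_eq_true, if_false,
          pvRunF, ih.2 [PySem.Str.strip l] out (by simp)]
      · simp only [pvStepA, h, if_false, Bool.false_eq_true, pvRunF, ih.1 out]
    · intro b out hb
      rw [step]
      by_cases h : PySem.Str.startswith (PySem.Str.strip l) "if:" = true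
      · simp only [pvStepA, h, reduceIte, Bool.true_and, pvRunT]
        rw [ih.2 [PySem.Str.strip l] _ (by simp),
          if_pos (show (!b.isEmpty) = true by simp [hb])]
        simp
      · simp only [pvStepA, if_neg h, reduceIte, pvContDef, pvRunT]
        by_cases hc : pvCont (PySem.Str.strip l) = true
        · rw [if_pos hc, if_pos hc, ih.2 (b ++ [PySem.Str.strip l]) out (by simp)]
        · rw [if_neg hc, if_neg hc, ih.1]
          simp

lemma pvStart_not_cont (l : String)
    (h : PySem.Str.startswith (PySem.Str.strip l) "if:" = true) :
    pvCont (PySem.Str.strip l) = false := by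
  have hin : PySem.Str.isIn ":" (PySem.Str.strip l) = true := by
    rw [PySem.Str.isIn_iff_infix]
    rw [PySem.Str.startswith_eq] at h
    have hp : "if:".toList <+: (PySem.Str.strip l).toList := by
      simpa [PySem.Chars.startswith] using h
    exact List.IsInfix.trans (by decide) hp.isInfix
  unfold pvCont
  rw [hin]
  simp

lemma pvRunT_eq : ∀ (lines b : List String),
    pvRunT b lines =
      PySem.Str.join " " (b ++ (lines.takeWhile (fun l => pvCont (PySem.Str.strip l))).map PySem.Str.strip)
        :: pvRunF lines := by
  intro lines
  induction lines with
  | nil => intro b; simp [pvRunT, pvRunF]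
  | cons l rest ih =>
    intro b
    by_cases h : PySem.Str.startswith (PySem.Str.strip l) "if:" = true
    · have h' : PySem.Chars.startswith (PySem.Chars.strip l.toList) ['i', 'f', ':'] = true := by
        simpa using h
      rw [List.takeWhile_cons_of_neg (by simp [pvStart_not_cont l h])]
      simp [pvRunT, pvRunF, h']
    · have h' : PySem.Chars.startswith (PySem.Chars.strip l.toList) ['i', 'f', ':'] = false := by
        simpa using h
      by_cases hc : pvCont (PySem.Str.strip l) = true
      · have hstep : pvRunT b (l :: rest) = pvRunT (b ++ [PySem.Str.strip l]) rest := by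
          simp [pvRunT, h', hc]
        rw [hstep, ih, List.takeWhile_cons_of_pos (by simpa using hc),
          show pvRunF (l :: rest) = pvRunF rest from by simp [pvRunF, h']]
        simp
      · rw [List.takeWhile_cons_of_neg (by simpa using hc)]
        simp [pvRunT, pvRunF, h', (by simpa using hc : pvCont (PySem.Str.strip l) = false)]

lemma pvCont_neg (s : String) :
    (s == "" || PySem.Str.startswith s "- " || PySem.Str.isIn ":" s) = !pvCont s := by
  unfold pvCont
  cases hx : (s == "") <;> cases hy : PySem.Str.startswith s "- " <;>
    cases hz : PySem.Str.isIn ":" s <;> simp [bne, hx]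

lemma pvCollect_eq (xs : List String) :
    pvCollect xs = (xs.takeWhile (fun l => pvCont (PySem.Str.strip l))).map PySem.Str.strip := by
  induction xs with
  | nil => simp [pvCollect]
  | cons l rest ih =>
    have hcond : (PySem.Str.strip l == "" || PySem.Str.startswith (PySem.Str.strip l) "- "
        || PySem.Str.isIn ":" (PySem.Str.strip l)) = !pvCont (PySem.Str.strip l) := pvCont_neg _
    by_cases hc : pvCont (PySem.Str.strip l) = true
    · rw [List.takeWhile_cons_of_pos (by simpa using hc)]
      simp only [pvCollect, hcond, hc, Bool.not_true, Bool.false_eq_true, if_false,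
        List.map_cons, ih]
    · have hc' : pvCont (PySem.Str.strip l) = false := by simpa using hc
      rw [List.takeWhile_cons_of_neg (by simpa using hc)]
      simp only [pvCollect, hcond, hc', Bool.not_false, if_true, List.map_nil]

lemma pvAlt_runF : ∀ (tail full : List String) (n : Nat), List.drop n full = tail →
    (((PySem.List.enumerate tail (n : Int)).filter
        (fun p => PySem.Str.startswith (PySem.Str.strip p.2) "if:")).map Prod.fst).map
      (fun i => PySem.Str.join " " (PySem.Str.strip (PySem.List.pyGetD full i "") ::
        pvCollect (PySem.List.slice full (some (i + 1)) none))) = pvRunF tail := by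
  intro tail
  induction tail with
  | nil => intro full n h; simp [PySem.List.enumerate_nil, pvRunF]
  | cons l rest ih =>
    intro full n h
    have hd : List.drop (n + 1) full = rest := by
      have := congrArg (List.drop 1) h
      rw [List.drop_drop] at this
      simpa [Nat.add_comm] using this
    have hget : PySem.List.pyGetD full (n : Int) "" = l := by
      have h0 : (List.drop n full)[0]? = some l := by rw [h]; rfl
      rw [List.getElem?_drop, Nat.add_zero] at h0
      rw [PySem.List.pyGetD_natCast]
      simp [List.getD_eq_getElem?_getD, h0]
    have hcast : ((n : Int) + 1) = ((n + 1 : Nat) : Int) := by push_cast; ring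
    have hslice : PySem.List.slice full (some ((n + 1 : Nat) : Int)) none = rest := by
      rw [PySem.List.slice_from_natCast, hd]
    rw [PySem.List.enumerate_cons]
    by_cases hs : PySem.Str.startswith (PySem.Str.strip l) "if:" = true
    · rw [List.filter_cons_of_pos (by simpa using hs)]
      simp only [List.map_cons]
      rw [hcast, ih full (n + 1) hd, hget, hslice]
      simp only [pvRunF]
      rw [if_pos hs, pvRunT_eq, pvCollect_eq]
      simp
    · rw [List.filter_cons_of_neg (by simpa using hs)]
      rw [hcast, ih full (n + 1) hd]
      simp only [pvRunF]
      rw [if_neg hs]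

-- ===== VERDICT (by name: the statement is the Claim_ definition above) =====
theorem iter_step_if_blocks_py_spec : Claim_equal_iter_step_if_blocks_py := by
  intro src _
  unfold Spec_iter_step_if_blocks_py
  have h1 := (pvFold_run (PySem.Str.splitlines src)).1 []
  have h2 := pvAlt_runF (PySem.Str.splitlines src) (PySem.Str.splitlines src) 0 rfl
  rw [Nat.cast_zero] at h2
  show pvFinish (List.foldl pvStepA (false, [], []) (PySem.Str.splitlines src)) =
    iter_step_if_blocks_py_alt src
  rw [h1, List.nil_append, ← h2]
  rfl
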